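-- pv_equiv track=rewrite | github.com/kamilkk00/Stanford_Algorithms | module_2/week_1/problem_1.py | scc_sort
-- ===== SOURCE A (Python) =====
-- def scc_sort(scc_list):
--     scc_sizes = []
--
--     # Calculate sizes and pair them with SCCs
--     for scc in scc_list:
--         length = len(scc)
--         scc_sizes.append((length, scc))
--
--     # Sort by size
--     scc_sizes.sort(reverse=True, key=lambda x: x[0])
--
--     top_5_scc = [size for size, _ in scc_sizes[:5]]
--
--     while len(top_5_scc) < 5:
--         top_5_scc.append(0)
--
--     return top_5_scc
-- ===== SOURCE B (Python) =====
-- def _ins(top, n):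
--     """Insert n into the descending list top, keeping its length fixed."""
--     if not top:
--         return []
--     if n > top[0]:
--         return [n] + top[:-1]
--     return [top[0]] + _ins(top[1:], n)
--
--
-- def scc_sort(scc_list):
--     top = [0, 0, 0, 0, 0]
--     for scc in scc_list:
--         top = _ins(top, len(scc))
--     return top
-- ===== Notes on version B (the rewrite author's own statement) =====
-- stated objective: alternative
-- what changed: Replaces the full sort of (size, scc) pairs plus slice-and-pad with a single pass that maintains a fixed-length-5 descending top list, inserting each component's size in place; no pairing, no global sort, no padding loop.
import Mathlib
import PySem

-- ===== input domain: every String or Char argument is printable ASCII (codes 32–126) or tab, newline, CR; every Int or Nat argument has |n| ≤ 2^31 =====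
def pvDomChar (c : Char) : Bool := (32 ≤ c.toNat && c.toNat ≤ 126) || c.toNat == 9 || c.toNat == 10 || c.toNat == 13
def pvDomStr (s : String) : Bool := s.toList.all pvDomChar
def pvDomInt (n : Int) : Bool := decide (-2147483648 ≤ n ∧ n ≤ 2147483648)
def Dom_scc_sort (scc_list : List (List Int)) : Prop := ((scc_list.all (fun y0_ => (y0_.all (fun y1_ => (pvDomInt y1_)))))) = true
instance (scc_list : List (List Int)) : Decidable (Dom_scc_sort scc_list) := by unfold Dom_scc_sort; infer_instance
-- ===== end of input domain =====

-- B replaces sort-then-slice-then-pad by a single pass maintaining a fixed length-5 descending top list (alternative decomposition, return value only).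


-- ===== PORT A =====
-- the 'while len(top_5_scc) < 5: append(0)' loop
def padLoop (l : List Int) : List Int :=
  if l.length < 5 then padLoop (l ++ [0]) else l
termination_by 5 - l.length
decreasing_by simp; omega

def scc_sort (scc_list : List (List Int)) : List Int :=
  let scc_sizes := scc_list.foldl (fun acc scc => acc ++ [((scc.length : Int), scc)]) []
  let sortedSizes := PySem.List.sorted scc_sizes (fun x => x.1) true
  let top5 := (PySem.List.slice sortedSizes none (some 5)).map (fun p => p.1)
  padLoop top5

-- ===== PORT B =====
-- _ins(top, n): insert n into the descending list top, keeping its length fixed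
def insTop : List Int → Int → List Int
  | [], _ => []
  | t :: ts, n =>
    if n > t then n :: PySem.List.slice (t :: ts) none (some (-1))
    else t :: insTop ts n

def scc_sort_alt (scc_list : List (List Int)) : List Int :=
  scc_list.foldl (fun top scc => insTop top ((scc.length : Int))) [0, 0, 0, 0, 0]

-- ===== PRECONDITION & SPEC =====
def Spec_scc_sort (scc_list : List (List Int)) (out : List Int) : Prop := out = scc_sort_alt scc_list
instance (scc_list : List (List Int)) (out : List Int) : Decidable (Spec_scc_sort scc_list out) := by unfold Spec_scc_sort; infer_instance

-- ===== CLAIM (what is proved, stated in full; the proofs are below) =====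
def Claim_equal_scc_sort : Prop := ∀ (scc_list : List (List Int)), Dom_scc_sort scc_list → Spec_scc_sort scc_list (scc_sort scc_list)

-- ===== LEMMAS AND PROOFS =====

-- descending sort with identity key
def S (xs : List Int) : List Int := PySem.List.sorted xs (fun x => x) true

-- descending insertion, after all elements ≥ n
def insD (n : Int) : List Int → List Int
  | [] => [n]
  | y :: ys => if n > y then n :: y :: ys else y :: insD n ys

theorem insD_perm (n : Int) (t : List Int) : (insD n t).Perm (n :: t) := by
  induction t with
  | nil => simp [insD]
  | cons y ys ih =>
    simp only [insD]
    split
    · exact List.Perm.refl _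
    · exact (ih.cons y).trans (List.Perm.swap n y ys)

theorem insD_length (n : Int) (t : List Int) : (insD n t).length = t.length + 1 :=
  (insD_perm n t).length_eq

theorem insD_ne_nil (n : Int) (t : List Int) : insD n t ≠ [] := by
  intro h
  have := insD_length n t
  simp [h] at this

theorem mem_insD {x n : Int} {t : List Int} : x ∈ insD n t ↔ x = n ∨ x ∈ t := by
  rw [(insD_perm n t).mem_iff]; simp

theorem insD_pairwise {n : Int} {t : List Int} (h : t.Pairwise (· ≥ ·)) :
    (insD n t).Pairwise (· ≥ ·) := by
  induction t with
  | nil => simp [insD]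
  | cons y ys ih =>
    rcases List.pairwise_cons.1 h with ⟨hy, hys⟩
    simp only [insD]
    split
    · rename_i hgt
      refine List.pairwise_cons.2 ⟨?_, h⟩
      intro b hb
      rcases List.mem_cons.1 hb with rfl | hb
      · omega
      · have := hy _ hb; omega
    · rename_i hle
      refine List.pairwise_cons.2 ⟨?_, ih hys⟩
      intro b hb
      rcases mem_insD.1 hb with rfl | hb
      · omega
      · exact hy _ hb

theorem eq_down {l₁ l₂ : List Int} (hp : l₁.Perm l₂)
    (h1 : l₁.Pairwise (· ≥ ·)) (h2 : l₂.Pairwise (· ≥ ·)) : l₁ = l₂ := by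
  exact hp.eq_of_pairwise (by intro a b _ _ h h'; omega) h1 h2

theorem S_perm (xs : List Int) : (S xs).Perm xs := PySem.List.sorted_perm xs (fun x => x) true

theorem S_pairwise (xs : List Int) : (S xs).Pairwise (· ≥ ·) := by
  have h := PySem.List.sorted_pairwise_rev (xs := xs) (key := fun x => x)
  exact h.imp (fun h => h)

theorem S_of_perm {a b : List Int} (h : a.Perm b) : S a = S b :=
  eq_down ((S_perm a).trans (h.trans (S_perm b).symm)) (S_pairwise a) (S_pairwise b)

theorem insD_S (n : Int) (q : List Int) : insD n (S q) = S (q ++ [n]) := by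
  refine eq_down ?_ (insD_pairwise (S_pairwise q)) (S_pairwise _)
  refine (insD_perm n (S q)).trans ?_
  refine (((S_perm q).cons n).trans ?_).trans (S_perm (q ++ [n])).symm
  exact List.perm_append_comm (l₁ := [n]) (l₂ := q)

theorem take_insD (n : Int) (k : Nat) (t : List Int) :
    (insD n (t.take k)).take k = (insD n t).take k := by
  induction t generalizing k with
  | nil => simp
  | cons y ys ih =>
    cases k with
    | zero => simp
    | succ m =>
      simp only [List.take_succ_cons, insD]
      split
      · cases m with
        | zero => simp
        | succ m' =>
          simp [List.take_take]
      · simp [ih m]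

theorem insTop_eq (t : List Int) (n : Int) : insTop t n = (insD n t).dropLast := by
  induction t with
  | nil => simp [insTop, insD]
  | cons y ys ih =>
    simp only [insTop, insD]
    split
    · rw [PySem.List.slice_to_neg_one]
      simp
    · rw [ih]
      rcases h : insD n ys with _ | ⟨a, l⟩
      · exact absurd h (insD_ne_nil n ys)
      · simp

theorem mapfst (ps : List (Int × List Int)) :
    (PySem.List.sorted ps (fun x => x.1) true).map (fun p => p.1) = S (ps.map (fun p => p.1)) := by
  refine eq_down ?_ ?_ (S_pairwise _)
  · exact ((PySem.List.sorted_perm ps (fun x => x.1) true).map _).trans (S_perm _).symm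
  · have h := PySem.List.sorted_pairwise_rev (xs := ps) (key := fun x => x.1)
    rw [List.pairwise_map]
    exact h.imp (fun h => h)

theorem build (l : List (List Int)) (acc : List (Int × List Int)) :
    l.foldl (fun acc scc => acc ++ [((scc.length : Int), scc)]) acc
      = acc ++ l.map (fun scc => ((scc.length : Int), scc)) := by
  induction l generalizing acc with
  | nil => simp
  | cons x xs ih => simp [ih]

theorem step (p : List Int) (n : Int) :
    insTop ((S (p ++ [0, 0, 0, 0, 0])).take 5) n = (S ((p ++ [n]) ++ [0, 0, 0, 0, 0])).take 5 := by
  have hlen : (S (p ++ [0, 0, 0, 0, 0])).length = p.length + 5 := by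
    have := (S_perm (p ++ [0, 0, 0, 0, 0])).length_eq
    simpa using this
  rw [insTop_eq]
  have h6 : (insD n ((S (p ++ [0, 0, 0, 0, 0])).take 5)).length = 6 := by
    rw [insD_length]
    simp [List.length_take, hlen]
  rw [List.dropLast_eq_take, h6]
  show (insD n ((S (p ++ [0, 0, 0, 0, 0])).take 5)).take 5 = _
  rw [take_insD, insD_S]
  congr 1
  apply S_of_perm
  rw [List.append_assoc, List.append_assoc]
  exact (List.perm_append_comm).append_left p

theorem inv (l : List (List Int)) (p : List Int) :
    l.foldl (fun top scc => insTop top ((scc.length : Int))) ((S (p ++ [0, 0, 0, 0, 0])).take 5)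
      = (S ((p ++ l.map (fun scc => ((scc.length : Int)))) ++ [0, 0, 0, 0, 0])).take 5 := by
  induction l generalizing p with
  | nil => simp
  | cons x xs ih =>
    simp only [List.foldl_cons, List.map_cons]
    rw [step p ((x.length : Int)), ih (p ++ [(x.length : Int)])]
    simp

theorem alt_eq (l : List (List Int)) :
    scc_sort_alt l = (S (l.map (fun scc => ((scc.length : Int))) ++ [0, 0, 0, 0, 0])).take 5 := by
  have h0 : ([0, 0, 0, 0, 0] : List Int) = (S (([] : List Int) ++ [0, 0, 0, 0, 0])).take 5 := by decide
  unfold scc_sort_alt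
  conv_lhs => rw [h0]
  rw [inv]
  simp

theorem padLoop_eq (l : List Int) : padLoop l = l ++ List.replicate (5 - l.length) 0 := by
  rw [padLoop]
  split
  · rename_i h
    rw [padLoop_eq (l ++ [0])]
    have h5 : 5 - l.length = (5 - (l.length + 1)) + 1 := by omega
    rw [List.append_assoc, h5, List.replicate_succ]
    simp
  · rename_i h
    have : 5 - l.length = 0 := by omega
    simp [this]
termination_by 5 - l.length
decreasing_by simp; omega

theorem S_append_zeros (lens : List Int) (hnn : ∀ x ∈ lens, 0 ≤ x) :
    S (lens ++ [0, 0, 0, 0, 0]) = S lens ++ [0, 0, 0, 0, 0] := by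
  refine (eq_down ?_ ?_ (S_pairwise _)).symm
  · exact ((S_perm lens).append_right _).trans (S_perm _).symm
  · rw [List.pairwise_append]
    refine ⟨S_pairwise lens, by decide, ?_⟩
    intro a ha b hb
    have ha' : 0 ≤ a := hnn a ((S_perm lens).mem_iff.1 ha)
    have hb' : b = 0 := by simpa using hb
    omega

theorem a_eq (l : List (List Int)) :
    scc_sort l = padLoop ((S (l.map (fun scc => ((scc.length : Int))))).take 5) := by
  have hdef : scc_sort l = padLoop ((PySem.List.slice
      (PySem.List.sorted (l.foldl (fun acc scc => acc ++ [((scc.length : Int), scc)]) [])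
        (fun x => x.1) true) none (some 5)).map (fun p => p.1)) := rfl
  rw [hdef]
  rw [build, List.nil_append]
  rw [PySem.List.slice_to _ (by omega : (0:Int) ≤ 5)]
  rw [List.map_take, mapfst]
  simp [List.map_map, Function.comp_def]

-- ===== VERDICT (by name: the statement is the Claim_ definition above) =====
theorem scc_sort_spec : Claim_equal_scc_sort := by
  intro l _
  unfold Spec_scc_sort
  rw [a_eq, alt_eq]
  set lens := l.map (fun scc => ((scc.length : Int))) with hlens
  have hnn : ∀ x ∈ lens, 0 ≤ x := by
    intro x hx
    rw [hlens, List.mem_map] at hx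
    rcases hx with ⟨scc, _, rfl⟩
    exact Int.natCast_nonneg _
  rw [S_append_zeros lens hnn]
  rw [padLoop_eq]
  have hz : ([0, 0, 0, 0, 0] : List Int) = List.replicate 5 0 := by decide
  rw [hz, List.take_append, List.take_replicate]
  have hc : 5 - (List.take 5 (S lens)).length = min (5 - (S lens).length) 5 := by
    simp [List.length_take]
    omega
  rw [hc]
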